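-- pv_equiv track=rewrite | github.com/trunglebka/sparrowhawk | norm_utils.py | detach_punct_chars
-- ===== SOURCE A (Python) =====
-- PUNCT_CHARS = set("!:;,.?")
--
-- def detach_punct_chars(text: str) -> str:
--     out = ""
--     for c in text:
--         if c in PUNCT_CHARS:
--             out += f" {c} "
--         else:
--             out += c
--     return out
-- ===== SOURCE B (Python) =====
-- def detach_punct_chars(text: str) -> str:
--     # Staged whole-string passes: one replace per punctuation char.
--     # Correct because no replacement string contains a *different* punctuation
--     # char, so the six passes do not interact.
--     for c in "!:;,.?":
--         text = text.replace(c, f" {c} ")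
--     return text
-- ===== Notes on version B (the rewrite author's own statement) =====
-- stated objective: idiomatic
-- what changed: Replaced the single per-character loop with membership test and accumulator by six staged whole-string str.replace passes, one per punctuation character; they commute because no replacement contains another punctuation char.
import Mathlib
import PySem

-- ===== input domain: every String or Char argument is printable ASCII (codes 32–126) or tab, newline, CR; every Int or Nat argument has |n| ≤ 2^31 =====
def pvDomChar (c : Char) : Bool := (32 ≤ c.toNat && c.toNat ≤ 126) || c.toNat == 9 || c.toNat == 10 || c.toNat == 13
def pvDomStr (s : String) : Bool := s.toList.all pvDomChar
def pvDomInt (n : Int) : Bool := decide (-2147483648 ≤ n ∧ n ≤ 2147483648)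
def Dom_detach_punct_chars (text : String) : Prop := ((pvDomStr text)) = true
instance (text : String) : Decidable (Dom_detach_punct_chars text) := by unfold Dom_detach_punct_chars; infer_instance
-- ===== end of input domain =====

-- B replaces A's single per-character accumulator loop by six staged whole-string
-- str.replace passes, one per punctuation character (idiomatic staged decomposition).

-- ===== PORT A =====
-- PUNCT_CHARS = set("!:;,.?")
def pvPunctChars : PySem.Set Char := PySem.Set.ofList "!:;,.?".toList

def detach_punct_chars (text : String) : String :=
  String.ofList (text.toList.foldl
    (fun out c => out ++ (if c ∈ pvPunctChars then [' ', c, ' '] else [c])) [])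

-- ===== PORT B =====
-- for c in "!:;,.?": text = text.replace(c, f" {c} ")
def detach_punct_chars_alt (text : String) : String :=
  "!:;,.?".toList.foldl
    (fun t c => PySem.Str.replace t (String.ofList [c]) (String.ofList [' ', c, ' '])) text

-- ===== PRECONDITION & SPEC =====
def Spec_detach_punct_chars (text : String) (out : String) : Prop := out = detach_punct_chars_alt text
instance (text : String) (out : String) : Decidable (Spec_detach_punct_chars text out) := by unfold Spec_detach_punct_chars; infer_instance

-- ===== CLAIM (what is proved, stated in full; the proofs are below) =====
def Claim_equal_detach_punct_chars : Prop := ∀ (text : String), Dom_detach_punct_chars text → Spec_detach_punct_chars text (detach_punct_chars text)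

-- ===== LEMMAS AND PROOFS =====

-- padding one char's worth of replacement, at the character level
def padRepl (c x : Char) : List Char := if x = c then [' ', c, ' '] else [x]

-- staged padding for a list of already-processed punctuation chars
def padAll (L : List Char) (x : Char) : List Char :=
  if x ∈ L then [' ', x, ' '] else [x]

-- replace with a single-char pattern is a flatMap (unrolling replace.go)
theorem go_single (c : Char) :
    ∀ (fuel : Nat) (l acc : List Char), l.length ≤ fuel →
      PySem.Chars.replace.go [c] [' ', c, ' '] fuel l acc
        = acc.reverse ++ l.flatMap (padRepl c) := by
  intro fuel
  induction fuel with
  | zero =>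
    intro l acc h
    have hl : l = [] := List.length_eq_zero_iff.mp (Nat.le_zero.mp h)
    subst hl
    simp [PySem.Chars.replace.go]
  | succ n ih =>
    intro l acc h
    cases l with
    | nil => simp [PySem.Chars.replace.go]
    | cons x t =>
      simp only [PySem.Chars.replace.go]
      by_cases hx : x = c
      · subst hx
        have hpre : List.isPrefixOf [x] (x :: t) = true := by simp [List.isPrefixOf]
        rw [if_pos hpre]
        have ht : t.length ≤ n := by simpa using h
        rw [List.length_singleton, List.drop_one, List.tail_cons,
            ih t ([' ', x, ' '].reverse ++ acc) ht]
        simp [padRepl]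
      · have hpre : List.isPrefixOf [c] (x :: t) = false := by
          simp [List.isPrefixOf]
          exact fun he => absurd he.symm hx
        rw [if_neg (by simp [hpre])]
        have ht : t.length ≤ n := by simpa using h
        rw [ih t (x :: acc) ht]
        simp [padRepl, hx]

theorem replace_single (c : Char) (s : List Char) :
    PySem.Chars.replace s [c] [' ', c, ' '] = s.flatMap (padRepl c) := by
  unfold PySem.Chars.replace
  rw [if_neg (by simp)]
  simpa using go_single c s.length s [] le_rfl

-- one staged pass extends the processed set, provided c is new and not a space
theorem pad_step (done : List Char) (c : Char) (hc : c ∉ done) (hsp : c ≠ ' ')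
    (x : Char) : (padAll done x).flatMap (padRepl c) = padAll (done ++ [c]) x := by
  unfold padAll
  by_cases hx : x ∈ done
  · have hxc : x ≠ c := fun he => hc (he ▸ hx)
    simp [hx, padRepl, hxc, Ne.symm hsp]
  · by_cases hxc : x = c
    · subst hxc
      simp [hx, padRepl]
    · simp [hx, hxc, padRepl]

-- the staged list-level folds accumulate into one flatMap
theorem stage_fold : ∀ (L done : List Char) (s : List Char),
    (done ++ L).Nodup → ' ' ∉ L →
    L.foldl (fun t c => PySem.Chars.replace t [c] [' ', c, ' ']) (s.flatMap (padAll done))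
      = s.flatMap (padAll (done ++ L)) := by
  intro L
  induction L with
  | nil => intro done s _ _; simp
  | cons c L' ih =>
    intro done s hnd hsp
    have hc : c ∉ done := by
      intro h
      exact (List.disjoint_of_nodup_append hnd) h (by simp)
    have hcs : c ≠ ' ' := fun he => hsp (he ▸ List.mem_cons_self)
    have hsp' : ' ' ∉ L' := fun h => hsp (List.mem_cons_of_mem _ h)
    have hnd' : ((done ++ [c]) ++ L').Nodup := by
      simpa [List.append_assoc] using hnd
    simp only [List.foldl_cons]
    rw [replace_single, List.flatMap_assoc]
    have : (fun x => (padAll done x).flatMap (padRepl c)) = padAll (done ++ [c]) := by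
      funext x; exact pad_step done c hc hcs x
    rw [this, ih (done ++ [c]) s hnd' hsp']
    simp [List.append_assoc]

-- A's accumulator body agrees pointwise with padAll over the full punctuation list
theorem a_pointwise (c : Char) :
    (if c ∈ pvPunctChars then [' ', c, ' '] else [c])
      = padAll "!:;,.?".toList c := by
  unfold padAll
  by_cases h : c ∈ pvPunctChars
  · have : c ∈ "!:;,.?".toList := by
      simpa [pvPunctChars, PySem.Set.mem_ofList] using h
    rw [if_pos h, if_pos this]
  · have : c ∉ "!:;,.?".toList := by
      intro hm
      exact h (by simpa [pvPunctChars, PySem.Set.mem_ofList] using hm)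
    rw [if_neg h, if_neg this]

-- B's string-level fold computes the list-level fold on toList
theorem b_toList : ∀ (L : List Char) (t : String),
    (L.foldl (fun t c => PySem.Str.replace t (String.ofList [c]) (String.ofList [' ', c, ' '])) t).toList
      = L.foldl (fun l c => PySem.Chars.replace l [c] [' ', c, ' ']) t.toList := by
  intro L
  induction L with
  | nil => intro t; rfl
  | cons c L' ih =>
    intro t
    simp only [List.foldl_cons]
    rw [ih, PySem.Str.toList_replace, String.toList_ofList, String.toList_ofList]

-- ===== VERDICT (by name: the statement is the Claim_ definition above) =====
theorem detach_punct_chars_spec : Claim_equal_detach_punct_chars := by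
  intro text _
  unfold Spec_detach_punct_chars detach_punct_chars detach_punct_chars_alt
  rw [PySem.List.foldl_append_eq_flatMap]
  simp only [List.nil_append]
  have hA : (text.toList.flatMap fun c => if c ∈ pvPunctChars then [' ', c, ' '] else [c])
      = text.toList.flatMap (padAll "!:;,.?".toList) :=
    List.flatMap_congr fun c _ => a_pointwise c
  have hid : text.toList.flatMap (padAll []) = text.toList := by
    have h1 : padAll [] = fun x => [x] := by
      funext x
      simp [padAll]
    rw [h1, List.flatMap_singleton']
  have hstage := stage_fold "!:;,.?".toList [] text.toList (by decide) (by decide)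
  rw [hid] at hstage
  simp only [List.nil_append] at hstage
  have hB := b_toList "!:;,.?".toList text
  rw [hA, ← hstage]
  exact ((congrArg String.ofList hB).symm).trans String.ofList_toList
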